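-- pv_equiv track=rewrite | github.com/poleha/py_examples | learn/sporting/brackets_rotation.py | get_sum4
-- ===== SOURCE A (Python) =====
-- def get_sum4(errors, L):
--     if not errors:
--         return L
--     stops = errors[:]
--     max_s = 0
--     prev_stop = None
--     stop = None
--     for stop in stops:
--         if prev_stop is None:
--             s = stop
--         else:
--             s = stop - prev_stop - 1
--         max_s = max(s, max_s)
--         prev_stop = stop
--     if stop is not None and stop < L - 1:
--         max_s = max(max_s, L - stop - 1)
--     return max_s
-- ===== SOURCE B (Python) =====
-- def _max_gap(seq, i, j):
--     # largest gap seq[k+1]-seq[k]-1 for i <= k < j, by divide and conquer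
--     if j <= i + 1:
--         return seq[j] - seq[i] - 1
--     m = (i + j) // 2
--     return max(_max_gap(seq, i, m), _max_gap(seq, m, j))
--
-- def get_sum4(errors, L):
--     if not errors:
--         return L
--     seq = [-1] + list(errors) + [L]
--     return max(0, _max_gap(seq, 0, len(seq) - 1))
-- ===== Notes on version B (the rewrite author's own statement) =====
-- stated objective: alternative
-- what changed: Replaces A's stateful left-to-right loop (prev_stop/max_s with None branches and a trailing conditional) by a divide-and-conquer recursion that computes the maximum adjacent gap of the sentinel-bounded sequence [-1]+errors+[L] by splitting the index range at its midpoint, plus a final 0 floor.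
import Mathlib
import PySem

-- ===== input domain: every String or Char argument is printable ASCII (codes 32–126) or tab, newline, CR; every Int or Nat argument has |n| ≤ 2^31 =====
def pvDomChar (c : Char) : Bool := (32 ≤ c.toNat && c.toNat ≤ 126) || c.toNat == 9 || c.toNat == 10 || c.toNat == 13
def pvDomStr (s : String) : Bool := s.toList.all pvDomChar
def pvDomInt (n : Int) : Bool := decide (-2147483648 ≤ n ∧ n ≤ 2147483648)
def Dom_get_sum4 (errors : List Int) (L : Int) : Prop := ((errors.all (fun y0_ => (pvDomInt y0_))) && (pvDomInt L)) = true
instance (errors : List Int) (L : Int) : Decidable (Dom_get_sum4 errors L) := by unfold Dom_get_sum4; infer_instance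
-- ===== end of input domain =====

-- B replaces A's stateful single-pass loop by a divide-and-conquer recursion on the index
-- range of the sentinel-bounded sequence [-1]+errors+[L] (alternative decomposition).


-- ===== PORT A =====
-- loop body: s from prev_stop (None at start), max_s = max(s, max_s), prev_stop = stop
def stepA (acc : Int × Option Int) (stop : Int) : Int × Option Int :=
  (max (match acc.2 with | none => stop | some prev => stop - prev - 1) acc.1, some stop)

-- final 'if stop is not None and stop < L - 1' adjustment
def finishA (L : Int) : Int × Option Int → Int
  | (m, none) => m
  | (m, some stop) => if stop < L - 1 then max m (L - stop - 1) else m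

def get_sum4 (errors : List Int) (L : Int) : Int :=
  if errors = [] then L
  else
    let stops := errors
    finishA L (stops.foldl stepA (0, none))

-- ===== PORT B =====
-- _max_gap(seq, i, j): indices are Nats and Python's seq[k] is in range (0 ≤ i < j < len seq
-- at every call from get_sum4_alt), so List.getD is exact here; (i+j)//2 on Nats is Nat./.
def dcB (seq : List Int) (i j : Nat) : Int :=
  if j ≤ i + 1 then seq.getD j 0 - seq.getD i 0 - 1
  else max (dcB seq i ((i + j) / 2)) (dcB seq ((i + j) / 2) j)
termination_by j - i
decreasing_by all_goals omega

def get_sum4_alt (errors : List Int) (L : Int) : Int :=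
  if errors = [] then L
  else
    let seq := -1 :: (errors ++ [L])
    max 0 (dcB seq 0 (seq.length - 1))

-- ===== PRECONDITION & SPEC =====
def Spec_get_sum4 (errors : List Int) (L : Int) (out : Int) : Prop := out = get_sum4_alt errors L
instance (errors : List Int) (L : Int) (out : Int) : Decidable (Spec_get_sum4 errors L out) := by unfold Spec_get_sum4; infer_instance

-- ===== CLAIM (what is proved, stated in full; the proofs are below) =====
def Claim_equal_get_sum4 : Prop := ∀ (errors : List Int) (L : Int), Dom_get_sum4 errors L → Spec_get_sum4 errors L (get_sum4 errors L)

-- ===== LEMMAS AND PROOFS =====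

-- proof-side: the list of adjacent gaps of seq, and the gap at index k
def gaps (seq : List Int) : List Int := (seq.zip seq.tail).map fun p => p.2 - p.1 - 1

def gidx (seq : List Int) (k : Nat) : Int := seq.getD (k + 1) 0 - seq.getD k 0 - 1

lemma gaps_cons_cons (a b : Int) (l : List Int) :
    gaps (a :: b :: l) = (b - a - 1) :: gaps (b :: l) := by
  simp [gaps]

-- A's loop+finish equals a plain max-fold over the gaps of prev :: rest ++ [L]
lemma fold_eq (L : Int) : ∀ (rest : List Int) (prev a0 : Int), 0 ≤ a0 →
    finishA L (rest.foldl stepA (a0, some prev)) =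
    (gaps (prev :: (rest ++ [L]))).foldl max a0 := by
  intro rest
  induction rest with
  | nil =>
      intro prev a0 h
      simp [gaps, finishA]
      omega
  | cons x xs ih =>
      intro prev a0 h
      rw [List.cons_append, gaps_cons_cons]
      simp only [List.foldl_cons, stepA]
      rw [ih x (max (x - prev - 1) a0) (by omega)]
      congr 1
      omega

lemma foldl_max_max (a b : Int) (l : List Int) :
    l.foldl max (max a b) = max a (l.foldl max b) := by
  induction l generalizing b with
  | nil => rfl
  | cons x xs ih => simp only [List.foldl_cons, max_assoc, ih]

lemma gaps_eq_map (a : Int) : ∀ (seq : List Int),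
    gaps (a :: seq) = (List.range seq.length).map (gidx (a :: seq)) := by
  intro seq
  induction seq generalizing a with
  | nil => simp [gaps]
  | cons b l ih =>
      rw [gaps_cons_cons, ih b, List.length_cons, List.range_succ_eq_map, List.map_cons,
        List.map_map]
      have hh : gidx (a :: b :: l) 0 = b - a - 1 := by simp [gidx]
      rw [← hh]
      congr 1

-- divide and conquer computes the max-fold of the gaps on the index range [i, j)
lemma dcB_eq (seq : List Int) : ∀ (n i j : Nat), j - i = n → i < j →
    dcB seq i j = ((List.range' (i + 1) (j - i - 1)).map (gidx seq)).foldl max (gidx seq i) := by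
  intro n
  induction n using Nat.strong_induction_on with
  | _ n ih =>
    intro i j hn hij
    by_cases h : j ≤ i + 1
    · have hj : j = i + 1 := by omega
      rw [dcB]
      simp [hj, gidx]
    · rw [dcB]
      simp only [if_neg h]
      set m := (i + j) / 2 with hm
      have h1 : i < m := by omega
      have h2 : m < j := by omega
      rw [ih (m - i) (by omega) i m rfl h1, ih (j - m) (by omega) m j rfl h2]
      have hsplit : List.range' (i + 1) (j - i - 1) =
          List.range' (i + 1) (m - i - 1) ++ m :: List.range' (m + 1) (j - m - 1) := by
        have hc : m :: List.range' (m + 1) (j - m - 1) = List.range' m (j - m) := by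
          have h6 : j - m = (j - m - 1) + 1 := by omega
          rw [h6, List.range'_succ]
          simp only [Nat.add_sub_cancel]
        rw [hc]
        have h4 : (m - i - 1) + (j - m) = j - i - 1 := by omega
        have h5 : i + 1 + 1 * (m - i - 1) = m := by omega
        rw [← h4, ← List.range'_append, h5]
      rw [hsplit, List.map_append, List.map_cons, List.foldl_append, List.foldl_cons]
      rw [foldl_max_max]

-- ===== VERDICT (by name: the statement is the Claim_ definition above) =====
theorem get_sum4_spec : Claim_equal_get_sum4 := by
  intro errors L _
  unfold Spec_get_sum4 get_sum4 get_sum4_alt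
  cases errors with
  | nil => simp
  | cons e rest =>
      simp only [if_neg (List.cons_ne_nil e rest), List.cons_append, List.foldl_cons]
      have hstep : stepA (0, none) e = (max e 0, some e) := rfl
      rw [hstep, fold_eq L rest e (max e 0) (by omega)]
      have hlen : ((-1 : Int) :: e :: (rest ++ [L])).length - 1 = rest.length + 2 := by simp
      rw [hlen, dcB_eq _ (rest.length + 2) 0 (rest.length + 2) rfl (by omega)]
      have hrange0 : List.range' (0 + 1) (rest.length + 2 - 0 - 1) =
          List.range' 1 (rest.length + 1) := by norm_num
      rw [hrange0]
      have hg0 : gidx ((-1 : Int) :: e :: (rest ++ [L])) 0 = e := by simp [gidx]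
      rw [hg0]
      have htail : gaps ((e : Int) :: (rest ++ [L])) =
          (List.range' 1 (rest.length + 1)).map (gidx ((-1 : Int) :: e :: (rest ++ [L]))) := by
        have h := gaps_eq_map (-1 : Int) (e :: (rest ++ [L]))
        have hlen2 : ((e : Int) :: (rest ++ [L])).length = rest.length + 2 := by simp
        rw [hlen2] at h
        have hr : List.range (rest.length + 2) = 0 :: List.range' 1 (rest.length + 1) := by
          rw [List.range_eq_range', show rest.length + 2 = (rest.length + 1) + 1 from rfl,
            List.range'_succ]
        rw [hr, List.map_cons] at h
        rw [gaps_cons_cons] at h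
        exact (List.cons_eq_cons.mp h).2
      rw [htail, show max e 0 = max 0 e from max_comm e 0, foldl_max_max]
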